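-- pv_equiv track=rewrite | github.com/rlebras/ParaFROST | main.py | has_independent_set_of_size_k_cpu
-- ===== SOURCE A (Python) =====
-- def has_independent_set_of_size_k_cpu(adj_matrix_2dlist, k=10):
--     """
--     Backtracking check for an independent set of size k.
--     Here adj_matrix_2dlist is a standard Python 2D list of 0/1.
--     We do this on the CPU because it's a combinatorial search
--     that doesn't map easily to a simple GPU kernel.
--     """
--     n = len(adj_matrix_2dlist)
--
--     def backtrack(chosen, start):
--         if len(chosen) == k:
--             return True
--         # Prune if not enough vertices remain
--         if n - start < k - len(chosen):
--             return False
--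
--         for v in range(start, n):
--             # Check if v is adjacent to any chosen vertex
--             conflict = False
--             for c in chosen:
--                 if adj_matrix_2dlist[c][v] == 1:
--                     conflict = True
--                     break
--             if not conflict:
--                 chosen.append(v)
--                 if backtrack(chosen, v + 1):
--                     return True
--                 chosen.pop()
--         return False
--
--     return backtrack([], 0)
-- ===== SOURCE B (Python) =====
-- def has_independent_set_of_size_k_cpu(adj_matrix_2dlist, k=10):
--     """
--     Backtracking check for an independent set of size k, driven by
--     candidate-set propagation: instead of rescanning the chosen vertices
--     for each candidate, keep the list of still-eligible vertices and,
--     when a vertex v is chosen, filter the remaining candidates by v's row.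
--     """
--     n = len(adj_matrix_2dlist)
--
--     def backtrack(count, candidates):
--         if count == k:
--             return True
--         if len(candidates) < k - count:
--             return False
--         for i, v in enumerate(candidates):
--             row = adj_matrix_2dlist[v]
--             new_cands = [w for w in candidates[i + 1:] if row[w] != 1]
--             if backtrack(count + 1, new_cands):
--                 return True
--         return False
--
--     return backtrack(0, list(range(n)))
-- ===== Notes on version B (the rewrite author's own statement) =====
-- stated objective: alternative
-- what changed: Replaces the per-candidate inner scan over the chosen list with candidate-set propagation: the recursion carries only a count and the list of still-eligible vertices, filtered by the chosen vertex's row at each step, with the usual not-enough-candidates prune.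
-- outside the precondition, e.g. on has_independent_set_of_size_k_cpu([[0], [0, 0]], 1): A returns True, B raises IndexError; on has_independent_set_of_size_k_cpu([[0, 1], [0]], 2): A returns False, B returns False
import Mathlib
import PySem

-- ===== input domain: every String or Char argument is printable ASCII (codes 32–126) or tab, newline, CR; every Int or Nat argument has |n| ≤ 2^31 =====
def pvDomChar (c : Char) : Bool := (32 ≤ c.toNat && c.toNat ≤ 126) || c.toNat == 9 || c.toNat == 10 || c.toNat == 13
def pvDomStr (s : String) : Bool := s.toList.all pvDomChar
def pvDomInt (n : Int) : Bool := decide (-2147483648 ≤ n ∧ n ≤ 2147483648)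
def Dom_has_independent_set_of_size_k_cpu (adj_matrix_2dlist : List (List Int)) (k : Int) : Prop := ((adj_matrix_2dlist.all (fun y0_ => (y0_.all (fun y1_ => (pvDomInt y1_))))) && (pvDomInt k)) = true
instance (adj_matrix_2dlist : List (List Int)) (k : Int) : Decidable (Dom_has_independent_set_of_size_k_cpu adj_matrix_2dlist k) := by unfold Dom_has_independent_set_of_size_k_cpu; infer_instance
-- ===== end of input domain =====

-- B replaces A's per-candidate scan over the chosen list with candidate-set propagation:
-- the recursion carries only a count and the still-eligible vertices, filtered by the
-- chosen vertex's row, plus the usual not-enough-candidates prune. Same boolean result.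


-- ===== PORT A =====
-- backtrack(chosen, start) and its inner `for v in range(start, n)` loop; the fuel argument is
-- only a totality guard (recursion depth is bounded by n+1 since start strictly increases).
mutual
def pvA_bt (adj : List (List Int)) (n : Nat) (k : Int) : Nat → List Nat → Nat → Bool
  | 0, _, _ => false
  | fuel+1, chosen, start =>
    if (chosen.length : Int) = k then true
    else if (n : Int) - (start : Int) < k - (chosen.length : Int) then false
    else pvA_for adj n k fuel chosen start
termination_by fuel _ _ => (fuel, 0)
decreasing_by all_goals simp [Prod.lex_iff]

def pvA_for (adj : List (List Int)) (n : Nat) (k : Int) : Nat → List Nat → Nat → Bool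
  | fuel, chosen, v =>
    if v < n then
      -- conflict = any chosen c with adj[c][v] == 1 (indices in range under Pre_)
      if !(chosen.any (fun c => (adj.getD c []).getD v 0 == 1))
         && pvA_bt adj n k fuel (chosen ++ [v]) (v+1) then true
      else pvA_for adj n k fuel chosen (v+1)
    else false
termination_by fuel _ v => (fuel, n + 1 - v)
decreasing_by all_goals simp [Prod.lex_iff]; all_goals omega
end

def has_independent_set_of_size_k_cpu (adj_matrix_2dlist : List (List Int)) (k : Int) : Bool :=
  pvA_bt adj_matrix_2dlist adj_matrix_2dlist.length k (adj_matrix_2dlist.length + 1) [] 0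

-- ===== PORT B =====
-- backtrack(count, candidates) with candidate-set propagation (Source B)
mutual
def pvB_bt (adj : List (List Int)) (k : Int) (count : Int) (cands : List Nat) : Bool :=
  if count = k then true
  else if (cands.length : Int) < k - count then false
  else pvB_for adj k count cands
termination_by (cands.length, 1)
decreasing_by all_goals simp [Prod.lex_iff]

def pvB_for (adj : List (List Int)) (k : Int) (count : Int) : List Nat → Bool
  | [] => false
  | v :: rest =>
    if pvB_bt adj k (count + 1)
         (rest.filter (fun w => !((adj.getD v []).getD w 0 == 1))) then true
    else pvB_for adj k count rest
termination_by cands => (cands.length, 0)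
decreasing_by
  all_goals simp [Prod.lex_iff]
  · exact List.length_filter_le _ _
end

def has_independent_set_of_size_k_cpu_alt (adj_matrix_2dlist : List (List Int)) (k : Int) : Bool :=
  pvB_bt adj_matrix_2dlist k 0 (List.range adj_matrix_2dlist.length)

-- ===== PRECONDITION & SPEC =====
-- Pre_ excludes ragged matrices (a row shorter than the matrix) except when n < k or k = 0,
-- where neither program ever indexes a row: on other ragged inputs Python A can raise
-- IndexError on adj_matrix_2dlist[c][v]; it also excludes some ragged inputs on which A's
-- search happens never to reach a short row and A still returns (see cites).
def Pre_has_independent_set_of_size_k_cpu (adj_matrix_2dlist : List (List Int)) (k : Int) : Prop :=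
  (∀ row ∈ adj_matrix_2dlist, adj_matrix_2dlist.length ≤ row.length)
    ∨ (adj_matrix_2dlist.length : Int) < k ∨ k = 0

instance (adj_matrix_2dlist : List (List Int)) (k : Int) : Decidable (Pre_has_independent_set_of_size_k_cpu adj_matrix_2dlist k) := by unfold Pre_has_independent_set_of_size_k_cpu; infer_instance

def pvWitness_has_independent_set_of_size_k_cpu : List (List Int) × Int := ([[0, 1], [1, 0]], 1)

def Spec_has_independent_set_of_size_k_cpu (adj_matrix_2dlist : List (List Int)) (k : Int) (out : Bool) : Prop := out = has_independent_set_of_size_k_cpu_alt adj_matrix_2dlist k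
instance (adj_matrix_2dlist : List (List Int)) (k : Int) (out : Bool) : Decidable (Spec_has_independent_set_of_size_k_cpu adj_matrix_2dlist k out) := by unfold Spec_has_independent_set_of_size_k_cpu; infer_instance

-- ===== CLAIM (what is proved, stated in full; the proofs are below) =====
def Claim_equal_has_independent_set_of_size_k_cpu : Prop := ∀ (adj_matrix_2dlist : List (List Int)) (k : Int), Dom_has_independent_set_of_size_k_cpu adj_matrix_2dlist k → Pre_has_independent_set_of_size_k_cpu adj_matrix_2dlist k → Spec_has_independent_set_of_size_k_cpu adj_matrix_2dlist k (has_independent_set_of_size_k_cpu adj_matrix_2dlist k)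

-- ===== LEMMAS AND PROOFS =====

-- the still-eligible vertices in [v, n): not adjacent (in A's orientation) to any chosen vertex
def pvElig (adj : List (List Int)) (chosen : List Nat) (v n : Nat) : List Nat :=
  (List.range' v (n - v)).filter
    (fun w => chosen.all (fun c => !((adj.getD c []).getD w 0 == 1)))

lemma all_not_eq_not_any (chosen : List Nat) (p : Nat → Bool) :
    chosen.all (fun c => !(p c)) = !(chosen.any p) := by
  induction chosen with
  | nil => simp
  | cons c cs ih => simp [List.all_cons, List.any_cons, ih]

lemma elig_filter (adj : List (List Int)) (chosen : List Nat) (v n : Nat) :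
    (pvElig adj chosen (v + 1) n).filter (fun w => !((adj.getD v []).getD w 0 == 1))
      = pvElig adj (chosen ++ [v]) (v + 1) n := by
  unfold pvElig
  rw [List.filter_filter]
  apply List.filter_congr
  intro w _
  simp [List.all_append, Bool.and_comm]

lemma elig_cons_of_ok (adj : List (List Int)) (chosen : List Nat) (v n : Nat) (hv : v < n)
    (hcb : (chosen.any (fun c => (adj.getD c []).getD v 0 == 1)) = false) :
    pvElig adj chosen v n = v :: pvElig adj chosen (v + 1) n := by
  unfold pvElig
  rw [show n - v = (n - (v + 1)) + 1 by omega, List.range'_succ, List.filter_cons]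
  rw [all_not_eq_not_any, hcb]
  simp

lemma elig_skip_of_conflict (adj : List (List Int)) (chosen : List Nat) (v n : Nat) (hv : v < n)
    (hc : (chosen.any (fun c => (adj.getD c []).getD v 0 == 1)) = true) :
    pvElig adj chosen v n = pvElig adj chosen (v + 1) n := by
  unfold pvElig
  rw [show n - v = (n - (v + 1)) + 1 by omega, List.range'_succ, List.filter_cons]
  rw [all_not_eq_not_any, hc]
  simp

-- A's loop also fails when fewer eligible vertices remain than are still needed
lemma pvA_for_short_aux (adj : List (List Int)) (n : Nat) (k : Int) (fuel : Nat)
    (IH : ∀ (chosen : List Nat) (start : Nat), start ≤ n →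
      ((pvElig adj chosen start n).length : Int) < k - (chosen.length : Int) →
      pvA_bt adj n k fuel chosen start = false) :
    ∀ (m : Nat) (chosen : List Nat) (v : Nat), v ≤ n → n - v ≤ m →
      ((pvElig adj chosen v n).length : Int) < k - (chosen.length : Int) →
      pvA_for adj n k fuel chosen v = false := by
  intro m
  induction m with
  | zero =>
    intro chosen v hvn hm _
    have hv : v = n := by omega
    subst hv
    rw [pvA_for]
    simp
  | succ m ih =>
    intro chosen v hvn hm hshort
    by_cases hv : v < n
    · rw [pvA_for, if_pos hv]
      by_cases hc : chosen.any (fun c => (adj.getD c []).getD v 0 == 1)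
      · rw [hc]
        simp only [Bool.not_true, Bool.false_and, Bool.false_eq_true, if_false]
        exact ih chosen (v + 1) (by omega) (by omega)
          (by rw [← elig_skip_of_conflict adj chosen v n hv hc]; exact hshort)
      · have hcb : (chosen.any (fun c => (adj.getD c []).getD v 0 == 1)) = false := by
          simpa using hc
        have hcons := elig_cons_of_ok adj chosen v n hv hcb
        have hlen1 : ((pvElig adj chosen (v + 1) n).length : Int)
            < k - (chosen.length : Int) - 1 := by
          have : (pvElig adj chosen v n).length = (pvElig adj chosen (v + 1) n).length + 1 := by
            rw [hcons]; simp
          omega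
        have hbt : pvA_bt adj n k fuel (chosen ++ [v]) (v + 1) = false := by
          apply IH (chosen ++ [v]) (v + 1) (by omega)
          rw [← elig_filter]
          have := List.length_filter_le (fun w => !((adj.getD v []).getD w 0 == 1))
            (pvElig adj chosen (v + 1) n)
          simp only [List.length_append, List.length_cons, List.length_nil]
          push_cast
          omega
        rw [hcb, hbt]
        simp only [Bool.not_false, Bool.true_and, Bool.false_eq_true, if_false]
        apply ih chosen (v + 1) (by omega) (by omega)
        have : (pvElig adj chosen v n).length = (pvElig adj chosen (v + 1) n).length + 1 := by
          rw [hcons]; simp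
        omega
    · have hv' : v = n := by omega
      subst hv'
      rw [pvA_for]
      simp

lemma pvA_bt_short (adj : List (List Int)) (n : Nat) (k : Int) :
    ∀ (fuel : Nat) (chosen : List Nat) (start : Nat), start ≤ n →
      ((pvElig adj chosen start n).length : Int) < k - (chosen.length : Int) →
      pvA_bt adj n k fuel chosen start = false := by
  intro fuel
  induction fuel with
  | zero => intro chosen start _ _; rw [pvA_bt]
  | succ fuel ih =>
    intro chosen start hsn hshort
    rw [pvA_bt]
    have hne : ¬ ((chosen.length : Int) = k) := by
      have : (0 : Int) ≤ ((pvElig adj chosen start n).length : Int) := Int.natCast_nonneg _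
      omega
    rw [if_neg hne]
    by_cases hp : (n : Int) - (start : Int) < k - (chosen.length : Int)
    · rw [if_pos hp]
    · rw [if_neg hp]
      exact pvA_for_short_aux adj n k fuel ih (n - start) chosen start hsn (le_refl _) hshort

lemma pvA_for_eq (adj : List (List Int)) (n : Nat) (k : Int) (fuel : Nat)
    (IH : ∀ (chosen : List Nat) (start : Nat), start ≤ n → n - start < fuel →
      pvA_bt adj n k fuel chosen start
        = pvB_bt adj k (chosen.length : Int) (pvElig adj chosen start n)) :
    ∀ (m : Nat) (chosen : List Nat) (v : Nat), v ≤ n → n - v ≤ m → n - v ≤ fuel →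
      pvA_for adj n k fuel chosen v
        = pvB_for adj k (chosen.length : Int) (pvElig adj chosen v n) := by
  intro m
  induction m with
  | zero =>
    intro chosen v hvn hm _
    have hv : v = n := by omega
    subst hv
    rw [pvA_for]
    simp [pvElig, pvB_for]
  | succ m ih =>
    intro chosen v hvn hm hf
    by_cases hv : v < n
    · rw [pvA_for, if_pos hv]
      by_cases hc : chosen.any (fun c => (adj.getD c []).getD v 0 == 1)
      · -- conflict at v: A skips, B never sees v
        rw [hc]
        simp only [Bool.not_true, Bool.false_and, Bool.false_eq_true, if_false]
        rw [elig_skip_of_conflict adj chosen v n hv hc]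
        exact ih chosen (v + 1) (by omega) (by omega) (by omega)
      · -- no conflict: v is the head of the candidate list
        have hcb : (chosen.any (fun c => (adj.getD c []).getD v 0 == 1)) = false := by
          simpa using hc
        rw [elig_cons_of_ok adj chosen v n hv hcb, pvB_for]
        have hbt : pvA_bt adj n k fuel (chosen ++ [v]) (v + 1)
            = pvB_bt adj k ((chosen.length : Int) + 1)
                ((pvElig adj chosen (v + 1) n).filter
                  (fun w => !((adj.getD v []).getD w 0 == 1))) := by
          rw [elig_filter]
          have := IH (chosen ++ [v]) (v + 1) (by omega) (by omega)
          simpa [List.length_append] using this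
        rw [hcb]
        simp only [Bool.not_false, Bool.true_and]
        rw [hbt]
        by_cases hrec : pvB_bt adj k ((chosen.length : Int) + 1)
            ((pvElig adj chosen (v + 1) n).filter
              (fun w => !((adj.getD v []).getD w 0 == 1))) = true
        · rw [hrec]; simp
        · rw [Bool.not_eq_true] at hrec
          rw [hrec]
          simp only [Bool.false_eq_true, if_false]
          exact ih chosen (v + 1) (by omega) (by omega) (by omega)
    · have hv' : v = n := by omega
      subst hv'
      rw [pvA_for]
      simp [pvElig, pvB_for]

lemma pvA_bt_eq (adj : List (List Int)) (n : Nat) (k : Int) :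
    ∀ (fuel : Nat) (chosen : List Nat) (start : Nat), start ≤ n → n - start < fuel →
      pvA_bt adj n k fuel chosen start
        = pvB_bt adj k (chosen.length : Int) (pvElig adj chosen start n) := by
  intro fuel
  induction fuel with
  | zero => intro _ _ _ h; omega
  | succ fuel ih =>
    intro chosen start hsn hf
    rw [pvA_bt, pvB_bt]
    by_cases hk : (chosen.length : Int) = k
    · rw [if_pos hk, if_pos hk]
    · rw [if_neg hk, if_neg hk]
      have hle : (pvElig adj chosen start n).length ≤ n - start := by
        have := List.length_filter_le
          (fun w => chosen.all (fun c => !((adj.getD c []).getD w 0 == 1)))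
          (List.range' start (n - start))
        simpa [pvElig] using this
      by_cases hp : (n : Int) - (start : Int) < k - (chosen.length : Int)
      · -- A prunes; B's candidate list is even shorter, so B prunes too
        rw [if_pos hp]
        have hshort : ((pvElig adj chosen start n).length : Int)
            < k - (chosen.length : Int) := by omega
        rw [if_pos hshort]
      · rw [if_neg hp]
        by_cases hshort : ((pvElig adj chosen start n).length : Int)
            < k - (chosen.length : Int)
        · -- B prunes on its (tighter) candidate count; A's loop fails too
          rw [if_pos hshort]
          exact pvA_for_short_aux adj n k fuel (pvA_bt_short adj n k fuel)
            (n - start) chosen start hsn (le_refl _) hshort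
        · rw [if_neg hshort]
          exact pvA_for_eq adj n k fuel ih (n - start) chosen start hsn (le_refl _) (by omega)

-- ===== VERDICT (by name: the statement is the Claim_ definition above) =====
theorem has_independent_set_of_size_k_cpu_spec : Claim_equal_has_independent_set_of_size_k_cpu := by
  intro adj k _ _
  unfold Spec_has_independent_set_of_size_k_cpu
  unfold has_independent_set_of_size_k_cpu has_independent_set_of_size_k_cpu_alt
  rw [pvA_bt_eq adj adj.length k (adj.length + 1) [] 0 (Nat.zero_le _) (by omega)]
  simp [pvElig, List.range_eq_range']
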